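-- pv_equiv track=rewrite | github.com/TARIQUE042/niet-codetantra | Competitive\Coding\2022/LAB 5/Q1.py | levelCount
-- ===== SOURCE A (Python) =====
-- def levelCount(treeStr):
--
-- 	n=len(treeStr.split())
-- 	sum=0
-- 	i=0
-- 	count=0
-- 	while sum<n:
-- 		sum+=2**i
-- 		i+=1
-- 		count+=1
--
-- 	return count
-- ===== SOURCE B (Python) =====
-- def levelCount(treeStr):
--     return len(treeStr.split()).bit_length()
-- ===== Notes on version B (the rewrite author's own statement) =====
-- stated objective: simpler
-- what changed: Replaces the while-loop accumulating powers of two with the closed form len(treeStr.split()).bit_length(), since the smallest k with 2^k-1 >= n equals n.bit_length().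
import Mathlib
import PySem

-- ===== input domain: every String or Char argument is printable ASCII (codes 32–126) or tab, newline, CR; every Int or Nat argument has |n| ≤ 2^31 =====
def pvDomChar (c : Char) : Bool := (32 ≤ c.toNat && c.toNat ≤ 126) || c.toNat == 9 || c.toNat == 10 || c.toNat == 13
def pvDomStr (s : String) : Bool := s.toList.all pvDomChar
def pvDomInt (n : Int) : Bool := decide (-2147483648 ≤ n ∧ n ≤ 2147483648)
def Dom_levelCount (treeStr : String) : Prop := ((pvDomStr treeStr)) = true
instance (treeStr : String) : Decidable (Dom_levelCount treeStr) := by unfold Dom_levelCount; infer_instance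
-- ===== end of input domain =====

-- B replaces A's power-accumulating while-loop by the closed form n.bit_length(); same value, no loop.

-- ===== PORT A =====
-- the while loop: state (sum, i, count); 'sum += 2**i; i += 1; count += 1' while sum < n
def levelCountLoop (n sum : Int) (i : Nat) (count : Int) : Int :=
  if sum < n then levelCountLoop n (sum + 2 ^ i) (i + 1) (count + 1) else count
termination_by (n - sum).toNat
decreasing_by
  have h1 : (0 : Int) < 2 ^ i := by positivity
  omega

def levelCount (treeStr : String) : Int :=
  let n : Int := (PySem.Str.split₀ treeStr).length
  levelCountLoop n 0 0 0

-- ===== PORT B =====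
def levelCount_alt (treeStr : String) : Int :=
  (PySem.Int.bitLength ((PySem.Str.split₀ treeStr).length : Int) : Int)

-- ===== PRECONDITION & SPEC =====
def Spec_levelCount (treeStr : String) (out : Int) : Prop := out = levelCount_alt treeStr
instance (treeStr : String) (out : Int) : Decidable (Spec_levelCount treeStr out) := by unfold Spec_levelCount; infer_instance

-- ===== CLAIM (what is proved, stated in full; the proofs are below) =====
def Claim_equal_levelCount : Prop := ∀ (treeStr : String), Dom_levelCount treeStr → Spec_levelCount treeStr (levelCount treeStr)

-- ===== LEMMAS AND PROOFS =====

-- 2^i ≤ n (with 0 ≤ n) forces i < bitLength n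
theorem lt_bitLength_of_pow_le (n : Int) (i : Nat) (h : (2 : Int) ^ i ≤ n) :
    i < PySem.Int.bitLength n := by
  by_contra hc
  push Not at hc
  have h1 : n.natAbs < 2 ^ PySem.Int.bitLength n := PySem.Int.lt_two_pow_bitLength n
  have h2 : (2 : Nat) ^ PySem.Int.bitLength n ≤ 2 ^ i := Nat.pow_le_pow_right (by norm_num) hc
  have h0 : 0 ≤ n := le_trans (by positivity) h
  have : (n.natAbs : Int) = n := Int.natAbs_of_nonneg h0
  have h5 : (2 : Nat) ^ i ≤ n.natAbs := by
    have hh : ((2 : Nat) ^ i : Int) = (2 : Int) ^ i := by push_cast; ring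
    have h4 : ((2 : Nat) ^ i : Int) ≤ (n.natAbs : Int) := by omega
    exact_mod_cast h4
  omega

-- n ≤ 2^i - 1 forces bitLength n ≤ i
theorem bitLength_le_of_lt_pow (n : Int) (i : Nat) (h0 : 0 ≤ n) (h : n < (2 : Int) ^ i) :
    PySem.Int.bitLength n ≤ i := by
  by_contra hc
  push Not at hc
  rcases eq_or_lt_of_le h0 with h0' | h0'
  · have : PySem.Int.bitLength n = 0 := by rw [← h0']; exact PySem.Int.bitLength_zero
    omega
  · have hne : n ≠ 0 := by omega
    have h1 : 2 ^ (PySem.Int.bitLength n - 1) ≤ n.natAbs := PySem.Int.two_pow_bitLength_le n hne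
    have h2 : (2 : Nat) ^ i ≤ 2 ^ (PySem.Int.bitLength n - 1) :=
      Nat.pow_le_pow_right (by norm_num) (by omega)
    have h3 : (2 : Nat) ^ i ≤ n.natAbs := le_trans h2 h1
    have h4 : ((2 : Nat) ^ i : Int) ≤ (n.natAbs : Int) := by exact_mod_cast h3
    have h5 : (n.natAbs : Int) = n := Int.natAbs_of_nonneg h0
    have h6 : ((2 : Nat) ^ i : Int) = (2 : Int) ^ i := by push_cast; ring
    omega

-- loop invariant at state (2^i - 1, i, i): result is max i (bitLength n)
theorem levelCountLoop_eq (n : Int) (hn : 0 ≤ n) (i : Nat) :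
    levelCountLoop n (2 ^ i - 1) i (i : Int) = (max i (PySem.Int.bitLength n) : Nat) := by
  by_cases hlt : (2 : Int) ^ i - 1 < n
  · have hle : (2 : Int) ^ i ≤ n := by omega
    have hib : i < PySem.Int.bitLength n := lt_bitLength_of_pow_le n i hle
    rw [levelCountLoop, if_pos hlt]
    have hs : (2 : Int) ^ i - 1 + 2 ^ i = 2 ^ (i + 1) - 1 := by ring
    have hc : ((i : Int) + 1) = ((i + 1 : Nat) : Int) := by push_cast; ring
    rw [hs, hc, levelCountLoop_eq n hn (i + 1)]
    congr 1
    omega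
  · rw [levelCountLoop, if_neg hlt]
    have hb : PySem.Int.bitLength n ≤ i := bitLength_le_of_lt_pow n i hn (by omega)
    have : max i (PySem.Int.bitLength n) = i := by omega
    rw [this]
termination_by (n - (2 ^ i - 1)).toNat
decreasing_by
  have h1 : (0 : Int) < 2 ^ i := by positivity
  omega

-- ===== VERDICT (by name: the statement is the Claim_ definition above) =====
theorem levelCount_spec : Claim_equal_levelCount := by
  intro treeStr _
  unfold Spec_levelCount levelCount levelCount_alt
  have h := levelCountLoop_eq ((PySem.Str.split₀ treeStr).length : Int) (by positivity) 0
  simp only [pow_zero, Nat.cast_zero, max_eq_right (Nat.zero_le _)] at h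
  norm_num at h ⊢
  rw [h]
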